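-- pv_equiv track=rewrite | github.com/wherby/code | contest/00000c315d89/lcp2023.1.2/q1/t1.py | runeReserve
-- ===== SOURCE A (Python) =====
-- from typing import List, Tuple, Optional
--
-- def runeReserve(runes: List[int]) -> int:
--     runes.sort()
--     mx= 1
--     acc =1
--     n = len(runes)
--     for i in range(1,n):
--         if runes[i]- runes[i-1]>1:
--             acc =1
--         else:
--             acc +=1
--             mx = max(acc,mx)
--     return mx
-- ===== SOURCE B (Python) =====
-- def runeReserve(runes):
--     runes.sort()
--     n = len(runes)
--     splits = [i for i in range(1, n) if runes[i] - runes[i - 1] > 1]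
--     bounds = [0] + splits + [n]
--     best = 1
--     for a, b in zip(bounds, bounds[1:]):
--         best = max(best, b - a)
--     return best
-- ===== Notes on version B (the rewrite author's own statement) =====
-- stated objective: alternative
-- what changed: Instead of A's inline acc/mx accumulation, B first collects split indices into a boundary list (zero, the split indices, then the length) and then takes the maximum of consecutive boundary differences (segment lengths), defaulting to 1.
import Mathlib
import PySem

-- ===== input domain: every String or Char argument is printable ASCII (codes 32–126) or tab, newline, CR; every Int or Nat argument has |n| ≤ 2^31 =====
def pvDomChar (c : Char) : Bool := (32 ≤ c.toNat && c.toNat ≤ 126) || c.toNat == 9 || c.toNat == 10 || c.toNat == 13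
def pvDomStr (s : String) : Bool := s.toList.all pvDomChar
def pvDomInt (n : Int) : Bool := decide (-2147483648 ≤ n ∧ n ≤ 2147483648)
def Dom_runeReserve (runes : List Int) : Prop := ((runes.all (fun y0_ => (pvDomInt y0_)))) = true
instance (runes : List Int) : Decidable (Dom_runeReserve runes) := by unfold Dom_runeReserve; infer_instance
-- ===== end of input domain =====

-- B replaces A's inline acc/mx scan by a boundary-index decomposition: collect split
-- indices, form the boundary list (zero, the splits, then n), and take the max consecutive
-- boundary difference (default 1).
-- Both A and B sort the argument in place (runes.sort()); the equivalence proved here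
-- is about the return value.


-- ===== PORT A =====
def runeReserve (runes : List Int) : Int :=
  let rs := PySem.List.sorted runes (fun x => x)
  let n : Int := rs.length
  ((PySem.List.pyRange 1 n 1).foldl
      (fun (st : Int × Int) i =>
        if PySem.List.pyGetD rs i 0 - PySem.List.pyGetD rs (i - 1) 0 > 1 then (st.1, 1)
        else (max (st.2 + 1) st.1, st.2 + 1))
      (1, 1)).1

-- ===== PORT B =====
def runeReserve_alt (runes : List Int) : Int :=
  let rs := PySem.List.sorted runes (fun x => x)
  let n : Int := rs.length
  let splits := (PySem.List.pyRange 1 n 1).filter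
      (fun i => decide (PySem.List.pyGetD rs i 0 - PySem.List.pyGetD rs (i - 1) 0 > 1))
  let bounds := 0 :: splits ++ [n]
  (bounds.zip bounds.tail).foldl (fun best p => max best (p.2 - p.1)) 1

-- ===== PRECONDITION & SPEC =====
def Spec_runeReserve (runes : List Int) (out : Int) : Prop := out = runeReserve_alt runes
instance (runes : List Int) (out : Int) : Decidable (Spec_runeReserve runes out) := by unfold Spec_runeReserve; infer_instance

-- ===== CLAIM (what is proved, stated in full; the proofs are below) =====
def Claim_equal_runeReserve : Prop := ∀ (runes : List Int), Dom_runeReserve runes → Spec_runeReserve runes (runeReserve runes)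

-- ===== LEMMAS AND PROOFS =====

-- max over consecutive differences of a boundary list, as B's zip-fold computes it
def foldZip (b : Int) (l : List Int) : Int :=
  (l.zip l.tail).foldl (fun best p => max best (p.2 - p.1)) b

theorem foldZip_cons (b x y : Int) (t : List Int) :
    foldZip b (x :: y :: t) = foldZip (max b (y - x)) (y :: t) := rfl

theorem foldZip_single (b x : Int) : foldZip b [x] = b := rfl

-- Loop invariant: A's scan from index a with state (mx, a - last) computes the max of
-- mx and the segment lengths cut by the splits in [a, n), the last segment ending at n.
theorem runeReserve_main (p : Int → Prop) [DecidablePred p] (n : Int) :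
    ∀ (k : Nat) (a last mx : Int), (n - a).toNat ≤ k → a ≤ n → 1 ≤ a - last → a - last ≤ mx →
    ((PySem.List.pyRange a n 1).foldl
        (fun (st : Int × Int) i => if p i then (st.1, 1) else (max (st.2 + 1) st.1, st.2 + 1))
        (mx, a - last)).1
      = foldZip mx (last :: (PySem.List.pyRange a n 1).filter (fun i => decide (p i)) ++ [n]) := by
  intro k
  induction k with
  | zero =>
      intro a last mx hk ha h1 h2
      have hna : n = a := by omega
      rw [PySem.List.pyRange_one_eq_nil (by omega)]
      simp [foldZip]
      omega
  | succ k ih =>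
      intro a last mx hk ha h1 h2
      by_cases hlt : a < n
      · rw [PySem.List.pyRange_one_cons hlt]
        simp only [List.foldl_cons, List.filter_cons]
        by_cases hp : p a
        · simp only [hp, if_pos, decide_eq_true_eq]
          have hih := ih (a + 1) a mx (by omega) (by omega) (by omega) (by omega)
          rw [show ((a:Int) + 1) - a = 1 by omega] at hih
          rw [hih]
          simp only [List.cons_append]
          rw [foldZip_cons]
          congr 1
          omega
        · simp only [hp, decide_eq_true_eq, if_false]
          have hih := ih (a + 1) last (max ((a + 1) - last) mx) (by omega) (by omega) (by omega)
                (le_max_left _ _)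
          rw [show ((a:Int) + 1) - last = a - last + 1 by omega] at hih
          rw [hih]
          -- the new mx is absorbed: the first boundary gap from `last` is ≥ (a+1) - last
          cases hs : (PySem.List.pyRange (a + 1) n 1).filter (fun i => decide (p i)) with
          | nil =>
              simp only [List.cons_append, List.nil_append, foldZip_cons, foldZip_single]
              omega
          | cons y t =>
              have hy : a + 1 ≤ y := by
                have hmem : y ∈ PySem.List.pyRange (a + 1) n 1 :=
                  List.mem_of_mem_filter (by rw [hs]; exact List.mem_cons_self)
                exact ((PySem.List.mem_pyRange_one).1 hmem).1
              simp only [List.cons_append, foldZip_cons]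
              congr 1
              omega
      · have hna : n = a := by omega
        rw [PySem.List.pyRange_one_eq_nil (by omega)]
        simp [foldZip]
        omega

-- ===== VERDICT (by name: the statement is the Claim_ definition above) =====
theorem runeReserve_spec : Claim_equal_runeReserve := by
  intro runes _
  unfold Spec_runeReserve runeReserve runeReserve_alt
  set rs := PySem.List.sorted runes (fun x => x) with hrs
  by_cases h0 : rs.length = 0
  · simp [h0, PySem.List.pyRange_one_eq_nil]
  · have h1 : (1 : Int) ≤ (rs.length : Int) := by
      have := Nat.pos_of_ne_zero h0; exact_mod_cast this
    have := runeReserve_main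
        (fun i => PySem.List.pyGetD rs i 0 - PySem.List.pyGetD rs (i - 1) 0 > 1)
        (rs.length) ((rs.length : Int) - 1).toNat 1 0 1 (by omega) h1 (by omega) (by omega)
    simpa [foldZip] using this
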